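-- pv_equiv track=rewrite | github.com/bawa-yatin/Python-Practice-Programs | Q.23/compareStringLen.py | str_compare_2
-- ===== SOURCE A (Python) =====
-- def str_compare_2(string1, string2):
--     total_1 = 0  # variable to keep track of the length of string1
--     total_2 = 0  # variable to keep track of the length of string2
--     for i in range(len(string1)):
--         total_1 += + 1
--     for j in range(len(string2)):
--         total_2 += + 1
--     if total_1 == total_2:
--         return True
--     else:
--         return False
-- ===== SOURCE B (Python) =====
-- def str_compare_2(string1, string2):
--     return len(string1) == len(string2)
-- ===== Notes on version B (the rewrite author's own statement) =====
-- stated objective: idiomatic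
-- what changed: Replaced the two character-counting loops with a direct comparison of len(string1) and len(string2).
import Mathlib
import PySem

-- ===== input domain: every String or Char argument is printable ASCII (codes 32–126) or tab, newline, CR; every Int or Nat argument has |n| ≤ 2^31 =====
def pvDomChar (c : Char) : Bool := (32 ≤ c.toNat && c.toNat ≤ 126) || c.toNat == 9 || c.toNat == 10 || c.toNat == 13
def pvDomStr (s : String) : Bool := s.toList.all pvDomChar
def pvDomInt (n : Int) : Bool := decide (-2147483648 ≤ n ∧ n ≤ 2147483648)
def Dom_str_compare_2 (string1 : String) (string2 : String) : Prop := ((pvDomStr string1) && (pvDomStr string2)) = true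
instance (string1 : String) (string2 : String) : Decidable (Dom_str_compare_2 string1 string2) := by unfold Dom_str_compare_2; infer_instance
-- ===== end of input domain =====

-- B replaces A's two character-counting loops with a direct comparison of the two lengths (idiomatic).

-- ===== PORT A =====
-- literal port: two loops over range(len(s)) accumulating +1, then compare
def str_compare_2 (string1 : String) (string2 : String) : Bool :=
  let total_1 := (PySem.List.pyRange 0 (PySem.Str.len string1) 1).foldl (fun acc _ => acc + 1) (0 : Int)
  let total_2 := (PySem.List.pyRange 0 (PySem.Str.len string2) 1).foldl (fun acc _ => acc + 1) (0 : Int)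
  if total_1 == total_2 then true else false

-- ===== PORT B =====
def str_compare_2_alt (string1 : String) (string2 : String) : Bool :=
  PySem.Str.len string1 == PySem.Str.len string2

-- ===== PRECONDITION & SPEC =====
def Spec_str_compare_2 (string1 : String) (string2 : String) (out : Bool) : Prop := out = str_compare_2_alt string1 string2
instance (string1 : String) (string2 : String) (out : Bool) : Decidable (Spec_str_compare_2 string1 string2 out) := by unfold Spec_str_compare_2; infer_instance

-- ===== CLAIM (what is proved, stated in full; the proofs are below) =====
def Claim_equal_str_compare_2 : Prop := ∀ (string1 : String) (string2 : String), Dom_str_compare_2 string1 string2 → Spec_str_compare_2 string1 string2 (str_compare_2 string1 string2)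

-- ===== LEMMAS AND PROOFS =====

-- folding +1 over any list starting from 0 yields the list's length
theorem pv_foldl_count (l : List Int) : l.foldl (fun acc _ => acc + 1) (0 : Int) = l.length := by
  have h : ∀ (l : List Int) (a : Int), l.foldl (fun acc _ => acc + 1) a = a + l.length := by
    intro l
    induction l with
    | nil => intro a; simp
    | cons x xs ih => intro a; simp [List.foldl, ih]; omega
  simpa using h l 0

-- ===== VERDICT (by name: the statement is the Claim_ definition above) =====
theorem str_compare_2_spec : Claim_equal_str_compare_2 := by
  intro s1 s2 _
  unfold Spec_str_compare_2 str_compare_2 str_compare_2_alt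
  simp only [pv_foldl_count, PySem.List.length_pyRange_one, PySem.Str.len_eq]
  by_cases h : s1.length = s2.length <;> simp [h, Int.natCast_inj]
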